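-- pv_equiv track=rewrite | github.com/Wisien999/WDI2020 | extra/kol_popr/2017_2018/zad3.py | solve
-- ===== SOURCE A (Python) =====
-- def solve(t1,t2):
--     i1,i2 = 0,0
--
--     deleted = [-1]*len(t1)
--     p = 0
--
--     while i1 < len(t1) and i2 < len(t2):
--         if t1[i1] > t2[i2]:
--             i2 += 1
--         elif t1[i1] < t2[i2]:
--             i1 += 1
--         else:
--             deleted[p] = t1[i1]
--             p += 1
--             del t1[i1]
--             del t2[i2]
--
--     return [el for el in deleted if el != -1]
-- ===== SOURCE B (Python) =====
-- def solve(t1, t2):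
--     # two-pointer scan: advance the index of the smaller element, both on a match
--     i, j = 0, 0
--     out = []
--     while i < len(t1) and j < len(t2):
--         if t1[i] > t2[j]:
--             j += 1
--         elif t1[i] < t2[j]:
--             i += 1
--         else:
--             out.append(t1[i])
--             i += 1
--             j += 1
--     return out
-- ===== Notes on version B (the rewrite author's own statement) =====
-- stated objective: faster
-- what changed: B replaces A's delete-in-place scan (a preallocated -1 sentinel buffer plus del on both lists at every match, then stripping the sentinels) with a pure two-pointer scan that advances both indices on a match and appends matches directly; Pre_ excludes inputs where -1, A's in-band sentinel, occurs in both lists, since there A's final filter may silently drop genuinely matched -1 values, an artefact of the sentinel encoding.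
-- outside the precondition, e.g. on solve([-1], [-1]): A returns [], B returns [-1]; on solve([0, -1], [-1, 0]): A returns [0], B returns [0]
import Mathlib
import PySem

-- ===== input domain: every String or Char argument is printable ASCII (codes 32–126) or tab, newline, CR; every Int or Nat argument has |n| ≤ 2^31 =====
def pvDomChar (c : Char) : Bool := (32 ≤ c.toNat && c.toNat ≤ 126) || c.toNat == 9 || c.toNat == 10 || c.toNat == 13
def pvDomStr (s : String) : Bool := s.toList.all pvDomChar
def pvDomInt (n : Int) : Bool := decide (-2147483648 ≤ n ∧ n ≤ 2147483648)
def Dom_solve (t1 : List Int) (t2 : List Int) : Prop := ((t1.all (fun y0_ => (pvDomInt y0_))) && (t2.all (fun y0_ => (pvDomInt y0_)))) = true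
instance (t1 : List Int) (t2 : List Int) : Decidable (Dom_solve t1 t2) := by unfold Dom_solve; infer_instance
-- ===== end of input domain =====

-- B replaces A's delete-in-place scan (a -1 sentinel buffer plus `del` on both lists, then
-- stripping the sentinels) by a pure two-pointer scan that advances both indices on a match.
-- Equivalence is about the RETURN value only: A empties matched elements out of its argument
-- lists in place, B does not mutate them.

-- ===== PORT A =====
-- A's while loop: indices i1,i2 into the (mutated) lists, a preallocated buffer `deleted`
-- of -1 sentinels written at position p, `del` on both lists on a match.  The loop runs at
-- most len(t1)+len(t2) iterations (each one shrinks (len t1 - i1) + (len t2 - i2)), so it is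
-- written with that fuel; the fuel guard only makes the same computation total.
def solveLoopA : Nat → List Int → Nat → List Int → Nat → List Int → Nat → List Int
  | 0, _, _, _, _, deleted, _ => deleted
  | fuel + 1, t1, i1, t2, i2, deleted, p =>
    if i1 < t1.length ∧ i2 < t2.length then
      if t1.getD i1 0 > t2.getD i2 0 then
        solveLoopA fuel t1 i1 t2 (i2 + 1) deleted p
      else if t1.getD i1 0 < t2.getD i2 0 then
        solveLoopA fuel t1 (i1 + 1) t2 i2 deleted p
      else
        solveLoopA fuel (t1.eraseIdx i1) i1 (t2.eraseIdx i2) i2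
          (deleted.set p (t1.getD i1 0)) (p + 1)
    else
      deleted

def solve (t1 : List Int) (t2 : List Int) : List Int :=
  (solveLoopA (t1.length + t2.length) t1 0 t2 0 (List.replicate t1.length (-1)) 0).filter
    (fun el => el != -1)

-- ===== PORT B =====
-- B's while loop: two pointers, both advanced on a match, matches appended to `out`;
-- same fuel bound (the loop runs at most len(t1)+len(t2) iterations).
def solveLoopB : Nat → List Int → List Int → Nat → Nat → List Int → List Int
  | 0, _, _, _, _, out => out
  | fuel + 1, t1, t2, i, j, out =>
    if i < t1.length ∧ j < t2.length then
      if t1.getD i 0 > t2.getD j 0 then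
        solveLoopB fuel t1 t2 i (j + 1) out
      else if t1.getD i 0 < t2.getD j 0 then
        solveLoopB fuel t1 t2 (i + 1) j out
      else
        solveLoopB fuel t1 t2 (i + 1) (j + 1) (out ++ [t1.getD i 0])
    else
      out

def solve_alt (t1 : List Int) (t2 : List Int) : List Int :=
  solveLoopB (t1.length + t2.length) t1 t2 0 0 []

-- ===== PRECONDITION & SPEC =====
-- Pre_ excludes inputs in which -1 — the in-band sentinel A preallocates its `deleted` buffer
-- with and strips at the end — occurs in BOTH lists: there A's final filter may silently drop
-- genuinely matched -1 values from the result (A([-1],[-1]) = []), an artefact of the sentinel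
-- encoding that no caller would specify; B returns the full list of matches ([-1]) there.
def Pre_solve (t1 : List Int) (t2 : List Int) : Prop := ¬ ((-1 : Int) ∈ t1 ∧ (-1 : Int) ∈ t2)
instance (t1 : List Int) (t2 : List Int) : Decidable (Pre_solve t1 t2) := by unfold Pre_solve; infer_instance

def pvWitness_solve : List Int × List Int := ([1, 3, 5], [2, 3, 5])

def Spec_solve (t1 : List Int) (t2 : List Int) (out : List Int) : Prop := out = solve_alt t1 t2
instance (t1 : List Int) (t2 : List Int) (out : List Int) : Decidable (Spec_solve t1 t2 out) := by unfold Spec_solve; infer_instance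

-- ===== CLAIM (what is proved, stated in full; the proofs are below) =====
def Claim_equal_solve : Prop := ∀ (t1 : List Int) (t2 : List Int), Dom_solve t1 t2 → Pre_solve t1 t2 → Spec_solve t1 t2 (solve t1 t2)

-- ===== LEMMAS AND PROOFS =====

-- the pure two-pointer scan both loops compute
def pvScan : List Int → List Int → List Int
  | a :: as, b :: bs =>
    if a > b then pvScan (a :: as) bs
    else if a < b then pvScan as (b :: bs)
    else a :: pvScan as bs
  | _, [] => []
  | [], _ => []
termination_by xs ys => xs.length + ys.length

theorem drop_eq_cons {l : List Int} {i : Nat} (h : i < l.length) :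
    l.drop i = l.getD i 0 :: l.drop (i + 1) := by
  rw [List.getD_eq_getElem l 0 h]
  exact (List.getElem_cons_drop h).symm

theorem pvScan_nil_left : ∀ ys, pvScan [] ys = [] := by
  intro ys; cases ys <;> simp [pvScan]

theorem pvScan_nil_right : ∀ xs, pvScan xs [] = [] := by
  intro xs; cases xs <;> simp [pvScan]

theorem pvScan_mem : ∀ (a b : List Int) (x : Int), x ∈ pvScan a b → x ∈ a ∧ x ∈ b := by
  intro a b
  induction a, b using pvScan.induct with
  | case1 a as b bs hgt ih =>
    intro x hx
    rw [pvScan, if_pos hgt] at hx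
    have := ih x hx
    exact ⟨this.1, List.mem_cons_of_mem _ this.2⟩
  | case2 a as b bs hgt hlt ih =>
    intro x hx
    rw [pvScan, if_neg hgt, if_pos hlt] at hx
    have := ih x hx
    exact ⟨List.mem_cons_of_mem _ this.1, this.2⟩
  | case3 a as b bs hgt hlt ih =>
    intro x hx
    rw [pvScan, if_neg hgt, if_neg hlt] at hx
    rcases List.mem_cons.mp hx with heq | hx
    · have hab : a = b := le_antisymm (not_lt.mp hgt) (not_lt.mp hlt)
      subst heq
      exact ⟨by simp, by simp [hab]⟩
    · have := ih x hx
      exact ⟨List.mem_cons_of_mem _ this.1, List.mem_cons_of_mem _ this.2⟩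
  | case4 h =>
    intro x hx
    rw [pvScan_nil_right] at hx
    cases hx
  | case5 b =>
    intro x hx
    rw [pvScan_nil_left] at hx
    cases hx

theorem eraseIdx_drop {l : List Int} {i : Nat} (h : i < l.length) :
    (l.eraseIdx i).drop i = l.drop (i + 1) := by
  rw [List.eraseIdx_eq_take_drop_succ]
  rw [List.drop_append_of_le_length (by simp; omega)]
  simp

theorem suffix_replicate {d : List Int} {p : Nat} (hp : p ≤ d.length)
    (hs : ∀ k, p ≤ k → k < d.length → d.getD k 0 = -1) :
    d = d.take p ++ List.replicate (d.length - p) (-1) := by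
  conv_lhs => rw [← List.take_append_drop p d]
  congr 1
  apply List.ext_getElem
  · simp
  · intro n h1 h2
    rw [List.getElem_drop]
    rw [List.getElem_replicate]
    have h3 : p + n < d.length := by simp at h1; omega
    have := hs (p + n) (by omega) h3
    rwa [List.getD_eq_getElem d 0 h3] at this

theorem take_succ_set {d : List Int} {p : Nat} {a : Int} (h : p < d.length) :
    (d.set p a).take (p + 1) = d.take p ++ [a] := by
  apply List.ext_getElem
  · simp; omega
  · intro n h1 h2
    simp only [List.getElem_take, List.getElem_set]
    by_cases hn : n = p
    · subst hn; simp
    · have hnp : n < p := by simp at h1; omega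
      rw [if_neg (by omega)]
      rw [List.getElem_append_left (by simp; omega)]
      simp [List.getElem_take]

theorem loopB_eq : ∀ (fuel : Nat) (t1 t2 : List Int) (i j : Nat) (out : List Int),
    (t1.length - i) + (t2.length - j) ≤ fuel →
    solveLoopB fuel t1 t2 i j out = out ++ pvScan (t1.drop i) (t2.drop j) := by
  intro fuel
  induction fuel with
  | zero =>
    intro t1 t2 i j out hf
    have hi : t1.length ≤ i := by omega
    rw [solveLoopB, List.drop_of_length_le hi, pvScan_nil_left]
    simp
  | succ fuel ih =>
    intro t1 t2 i j out hf
    rw [solveLoopB]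
    by_cases h : i < t1.length ∧ j < t2.length
    · rw [if_pos h]
      by_cases hgt : t1.getD i 0 > t2.getD j 0
      · rw [if_pos hgt, ih _ _ _ _ _ (by omega),
          drop_eq_cons h.1, drop_eq_cons h.2, pvScan, if_pos hgt]
      · rw [if_neg hgt]
        by_cases hlt : t1.getD i 0 < t2.getD j 0
        · rw [if_pos hlt, ih _ _ _ _ _ (by omega),
            drop_eq_cons h.1, drop_eq_cons h.2, pvScan, if_neg hgt, if_pos hlt]
        · rw [if_neg hlt, ih _ _ _ _ _ (by omega),
            drop_eq_cons h.1, drop_eq_cons h.2, pvScan, if_neg hgt, if_neg hlt]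
          simp
    · rw [if_neg h]
      have hs : pvScan (t1.drop i) (t2.drop j) = [] := by
        rcases Nat.lt_or_ge i t1.length with hi | hi
        · have hj : t2.length ≤ j := by omega
          rw [List.drop_of_length_le hj, pvScan_nil_right]
        · rw [List.drop_of_length_le hi, pvScan_nil_left]
      rw [hs]
      simp

theorem loopA_eq : ∀ (fuel : Nat) (t1 : List Int) (i1 : Nat) (t2 : List Int) (i2 : Nat)
    (deleted : List Int) (p : Nat),
    (t1.length - i1) + (t2.length - i2) ≤ fuel →
    p + (t1.length - i1) ≤ deleted.length →
    (∀ k, p ≤ k → k < deleted.length → deleted.getD k 0 = -1) →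
    solveLoopA fuel t1 i1 t2 i2 deleted p =
      deleted.take p ++ pvScan (t1.drop i1) (t2.drop i2) ++
        List.replicate (deleted.length - p - (pvScan (t1.drop i1) (t2.drop i2)).length) (-1) := by
  intro fuel
  induction fuel with
  | zero =>
    intro t1 i1 t2 i2 deleted p hf hroom hsuf
    have hi : t1.length ≤ i1 := by omega
    rw [solveLoopA, List.drop_of_length_le hi, pvScan_nil_left]
    simp only [List.length_nil, List.append_nil, Nat.sub_zero]
    exact suffix_replicate (by omega) hsuf
  | succ fuel ih =>
    intro t1 i1 t2 i2 deleted p hf hroom hsuf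
    rw [solveLoopA]
    by_cases h : i1 < t1.length ∧ i2 < t2.length
    · rw [if_pos h]
      by_cases hgt : t1.getD i1 0 > t2.getD i2 0
      · rw [if_pos hgt, ih _ _ _ _ _ _ (by omega) hroom hsuf,
          drop_eq_cons h.1, drop_eq_cons h.2, pvScan, if_pos hgt]
      · rw [if_neg hgt]
        by_cases hlt : t1.getD i1 0 < t2.getD i2 0
        · rw [if_pos hlt, ih _ _ _ _ _ _ (by omega) (by omega) hsuf,
            drop_eq_cons h.1, drop_eq_cons h.2, pvScan, if_neg hgt, if_pos hlt]
        · rw [if_neg hlt]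
          have hlen1 : (t1.eraseIdx i1).length = t1.length - 1 :=
            List.length_eraseIdx_of_lt h.1
          have hlen2 : (t2.eraseIdx i2).length = t2.length - 1 :=
            List.length_eraseIdx_of_lt h.2
          have hplt : p < deleted.length := by omega
          have hsuf' : ∀ k, p + 1 ≤ k → k < (deleted.set p (t1.getD i1 0)).length →
              (deleted.set p (t1.getD i1 0)).getD k 0 = -1 := by
            intro k hk1 hk2
            simp only [List.length_set] at hk2
            rw [List.getD_eq_getElem _ 0 (by simpa using hk2)]
            rw [List.getElem_set_ne (by omega)]
            have := hsuf k (by omega) hk2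
            rwa [List.getD_eq_getElem deleted 0 hk2] at this
          rw [ih _ _ _ _ _ _ (by omega) (by simp [List.length_set, hlen1]; omega) hsuf']
          rw [eraseIdx_drop h.1, eraseIdx_drop h.2]
          rw [drop_eq_cons h.1, drop_eq_cons h.2, pvScan, if_neg hgt, if_neg hlt]
          rw [take_succ_set hplt, List.length_set]
          have harith : deleted.length - (p + 1) - (pvScan (t1.drop (i1+1)) (t2.drop (i2+1))).length
              = deleted.length - p - ((pvScan (t1.drop (i1+1)) (t2.drop (i2+1))).length + 1) := by omega
          rw [harith]
          simp
    · rw [if_neg h]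
      have hs : pvScan (t1.drop i1) (t2.drop i2) = [] := by
        rcases Nat.lt_or_ge i1 t1.length with hi | hi
        · have : t2.length ≤ i2 := by omega
          rw [List.drop_of_length_le this, pvScan_nil_right]
        · rw [List.drop_of_length_le hi, pvScan_nil_left]
      rw [hs]
      simp only [List.length_nil, List.append_nil, Nat.sub_zero]
      exact suffix_replicate (by omega) hsuf

theorem solve_eq_filter (t1 t2 : List Int) :
    solve t1 t2 = (pvScan t1 t2).filter (fun el => el != -1) := by
  rw [solve, loopA_eq (t1.length + t2.length) t1 0 t2 0 (List.replicate t1.length (-1)) 0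
    (by omega) (by simp)
    (by intro k _ hk; simp only [List.length_replicate] at hk; simp [List.getD, hk])]
  simp [List.filter_append]

theorem solve_alt_eq_scan (t1 t2 : List Int) : solve_alt t1 t2 = pvScan t1 t2 := by
  rw [solve_alt, loopB_eq (t1.length + t2.length) t1 t2 0 0 [] (by omega)]
  simp

-- ===== VERDICT (by name: the statement is the Claim_ definition above) =====
theorem solve_spec : Claim_equal_solve := by
  intro t1 t2 _ hPre
  show solve t1 t2 = solve_alt t1 t2
  rw [solve_eq_filter, solve_alt_eq_scan]
  apply List.filter_eq_self.mpr
  intro x hx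
  have hx1 : x ≠ -1 := by
    rintro rfl
    exact hPre (pvScan_mem t1 t2 (-1) hx)
  simp [hx1]
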